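-- pv_equiv track=rewrite | github.com/benyebai/Tower-Defense | game.py | find_can_place
-- ===== SOURCE A (Python) =====
-- import math
--
-- def find_can_place(stage_real):
--     stage = stage_real.copy()
--     stage = [[math.ceil(i[0]/100),math.ceil(i[1]/100)] for i in stage]
--     stage[0] = [stage[0][0] + 1, stage[0][1]]
--
--     part = 1
--     temp = stage[0].copy()
--     ground = []
--     ground.append(stage[0])
--     # [[1, 3], [5, 3], [5, 5], [12, 5]]
--
--     while temp != stage[-1]:
--         if part != len(stage):
--                 if stage[part][0] - temp[0] == 0 and stage[part][1] - temp[1] == 0: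
--                     part += 1
--
--                 else:
--                     if stage[part][0] - temp[0] > 0:
--                         temp[0] += 1
--
--                     elif stage[part][0] - temp[0] < 0:
--                         temp[0] -= 1
--
--                     elif stage[part][1] - temp[1] > 0:
--                         temp[1] += 1
--
--                     elif stage[part][1] - temp[1] < 0:
--                         temp[1] -= 1
--
--                     ground.append(temp.copy())
--
--
--
--     return ground
-- ===== SOURCE B (Python) =====
-- import math
--
-- def find_can_place(stage_real):
--     # Generate-then-truncate: build the whole x-then-y interpolated path per waypoint
--     # pair with arithmetic ranges, then cut at the first occurrence of the goal cell.
--     stage = [[math.ceil(r[0] / 100), math.ceil(r[1] / 100)] for r in stage_real]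
--     stage[0] = [stage[0][0] + 1, stage[0][1]]
--     goal = stage[-1]
--     path = [stage[0]]
--     for (x0, y0), (x1, y1) in zip(stage, stage[1:]):
--         sx = 1 if x1 >= x0 else -1
--         path += [[x, y0] for x in range(x0 + sx, x1 + sx, sx)]
--         sy = 1 if y1 >= y0 else -1
--         path += [[x1, y] for y in range(y0 + sy, y1 + sy, sy)]
--     return path[:path.index(goal) + 1]
-- ===== Notes on version B (the rewrite author's own statement) =====
-- stated objective: alternative
-- what changed: Replaces A's unit-step cursor simulation (one while-loop advancing temp one cell per iteration with sign tests and a part pointer) by a generate-then-truncate pipeline: each waypoint pair contributes its whole x-block and y-block at once as arithmetic ranges, and the finished path is cut at the first occurrence of the goal cell via list.index, which reproduces A's early termination.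
import Mathlib
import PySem

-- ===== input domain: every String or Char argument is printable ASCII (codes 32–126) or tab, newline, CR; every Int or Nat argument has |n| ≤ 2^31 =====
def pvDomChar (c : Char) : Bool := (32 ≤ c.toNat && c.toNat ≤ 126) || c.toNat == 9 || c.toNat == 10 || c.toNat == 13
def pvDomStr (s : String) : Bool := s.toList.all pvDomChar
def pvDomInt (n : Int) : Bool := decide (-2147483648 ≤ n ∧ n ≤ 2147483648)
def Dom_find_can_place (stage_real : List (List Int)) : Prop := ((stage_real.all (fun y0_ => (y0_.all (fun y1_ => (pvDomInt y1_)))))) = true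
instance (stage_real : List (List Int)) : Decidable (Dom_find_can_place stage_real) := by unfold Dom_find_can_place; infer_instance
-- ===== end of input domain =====

-- B builds the whole interpolated path at once from arithmetic ranges per waypoint pair and
-- then truncates it at the first occurrence of the goal cell, instead of A's unit-step cursor
-- simulation with an early exit (objective: alternative, same cost).

-- ===== PORT A =====
-- math.ceil(n/100) : exact for |n| ≤ 2^31 (float rounding cannot cross an integer there);
-- ported as the exact ceiling division -((-n) // 100).
def pvCeil100 (n : Int) : Int := -(PySem.Int.floordiv (-n) 100)

-- the scaling comprehension [[ceil(i[0]/100), ceil(i[1]/100)] for i in stage]; rows as pairs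
-- (scaled rows always have exactly 2 entries).  r[0]/r[1] raise IndexError on short rows:
-- Pre_ requires every row to have ≥ 2 entries, so the .getD 0 default is never taken.
def pvScale (stage_real : List (List Int)) : List (Int × Int) :=
  stage_real.map (fun r =>
    (pvCeil100 ((PySem.List.pyGet? r 0).getD 0), pvCeil100 ((PySem.List.pyGet? r 1).getD 0)))

-- termination helpers, kept as tiny named lemmas so the ports' proof closures stay small
theorem pvAbsDecPos (d : Int) (h : 0 < d) : (d - 1).natAbs < d.natAbs :=
  Int.natAbs_lt_natAbs_of_nonneg_of_lt (by omega) (by omega)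

theorem pvAbsDecNeg (d : Int) (h : d < 0) : (d + 1).natAbs < d.natAbs := by
  rw [← Int.natAbs_neg (d + 1), ← Int.natAbs_neg d]
  exact Int.natAbs_lt_natAbs_of_nonneg_of_lt (by omega) (by omega)

-- a step toward stage[part] shrinks the taxicab distance
theorem pvStepDec (tx ty x y : Int) (p : Int × Int) (h : ¬(tx - x = 0 ∧ ty - y = 0))
    (hp : p = if tx - x > 0 then (x + 1, y)
        else if tx - x < 0 then (x - 1, y)
        else if ty - y > 0 then (x, y + 1) else (x, y - 1)) :
    (tx - p.1).natAbs + (ty - p.2).natAbs < (tx - x).natAbs + (ty - y).natAbs := by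
  subst hp
  by_cases h1 : tx - x > 0
  · rw [if_pos h1]
    exact Nat.add_lt_add_right
      (by rw [show tx - (x + 1, y).1 = (tx - x) - 1 by ring]; exact pvAbsDecPos _ h1) _
  · rw [if_neg h1]
    by_cases h2 : tx - x < 0
    · rw [if_pos h2]
      exact Nat.add_lt_add_right
        (by rw [show tx - (x - 1, y).1 = (tx - x) + 1 by ring]; exact pvAbsDecNeg _ h2) _
    · rw [if_neg h2]
      by_cases h3 : ty - y > 0
      · rw [if_pos h3]
        exact Nat.add_lt_add_left
          (by rw [show ty - (x, y + 1).2 = (ty - y) - 1 by ring]; exact pvAbsDecPos _ h3) _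
      · rw [if_neg h3]
        exact Nat.add_lt_add_left
          (by rw [show ty - (x, y - 1).2 = (ty - y) + 1 by ring]
              exact pvAbsDecNeg _ (by omega)) _

-- the while-loop of A: state (part, temp, ground); `last` is stage[-1].
-- The `else ground` arm (part = len(stage)) is a totality guard: Python would spin forever
-- there, but the state is unreachable from the initial state (part only passes len-1 after
-- temp = stage[-1], which exits the loop first).
def pvALoop (stage : List (Int × Int)) (last : Int × Int) (part : Nat) (temp : Int × Int)
    (ground : List (List Int)) : List (List Int) :=
  if temp = last then ground
  else if h : part < stage.length then
    if htv : stage[part].1 - temp.1 = 0 ∧ stage[part].2 - temp.2 = 0 then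
      pvALoop stage last (part + 1) temp ground
    else
      let temp' :=
        if stage[part].1 - temp.1 > 0 then (temp.1 + 1, temp.2)
        else if stage[part].1 - temp.1 < 0 then (temp.1 - 1, temp.2)
        else if stage[part].2 - temp.2 > 0 then (temp.1, temp.2 + 1)
        else (temp.1, temp.2 - 1)
      pvALoop stage last part temp' (ground ++ [[temp'.1, temp'.2]])
  else ground
termination_by (stage.length - part,
  ((stage[part]?.getD (0, 0)).1 - temp.1).natAbs + ((stage[part]?.getD (0, 0)).2 - temp.2).natAbs)
decreasing_by
  · exact Prod.Lex.left _ _ (Nat.sub_lt_sub_left h (Nat.lt_succ_self part))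
  · apply Prod.Lex.right
    rw [List.getElem?_eq_getElem h, Option.getD_some]
    exact pvStepDec _ _ _ _ _ htv (by simp only [dite_eq_ite])

def find_can_place (stage_real : List (List Int)) : List (List Int) :=
  match pvScale stage_real with
  | [] => []          -- Python raises IndexError on stage[0]; excluded by Pre_
  | s0 :: rest =>
    let s0' := (s0.1 + 1, s0.2)
    let stage := s0' :: rest
    pvALoop stage (stage.getLast (by simp)) 1 s0' [[s0'.1, s0'.2]]

-- ===== PORT B =====
-- the comprehension [[x, y0] for x in range(x0+sx, x1+sx, sx)] with sx = 1 if x1 >= x0 else -1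
def pvBX (x0 x1 y0 : Int) : List (List Int) :=
  (PySem.List.pyRange (x0 + (if x1 ≥ x0 then (1 : Int) else -1))
    (x1 + (if x1 ≥ x0 then (1 : Int) else -1))
    (if x1 ≥ x0 then (1 : Int) else -1)).map (fun x => [x, y0])

-- the comprehension [[x1, y] for y in range(y0+sy, y1+sy, sy)] with sy = 1 if y1 >= y0 else -1
def pvBY (y0 y1 x1 : Int) : List (List Int) :=
  (PySem.List.pyRange (y0 + (if y1 ≥ y0 then (1 : Int) else -1))
    (y1 + (if y1 ≥ y0 then (1 : Int) else -1))
    (if y1 ≥ y0 then (1 : Int) else -1)).map (fun y => [x1, y])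

def find_can_place_alt (stage_real : List (List Int)) : List (List Int) :=
  match pvScale stage_real with
  | [] => []          -- Python raises IndexError on stage[0]; excluded by Pre_
  | s0 :: rest =>
    let start := (s0.1 + 1, s0.2)
    let goal := (start :: rest).getLast (by simp)
    -- the `for (x0,y0),(x1,y1) in zip(stage, stage[1:])` loop appending both comprehensions
    let path := ((start :: rest).zip rest).foldl
      (fun path p => path ++ pvBX p.1.1 p.2.1 p.1.2 ++ pvBY p.1.2 p.2.2 p.2.1)
      [[start.1, start.2]]
    -- path[:path.index(goal) + 1]; goal always occurs on path, so Python's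
    -- ValueError branch (`none`) is unreachable
    match PySem.List.index? path [goal.1, goal.2] with
    | some i => path.take (i + 1)
    | none => []

-- ===== PRECONDITION & SPEC =====
-- Python A raises IndexError exactly on the empty list (stage[0], stage[-1]) and on any row
-- with fewer than 2 entries (i[0]/i[1] in the comprehension); those inputs are excluded.
def Pre_find_can_place (stage_real : List (List Int)) : Prop :=
  stage_real ≠ [] ∧ ∀ r ∈ stage_real, 2 ≤ r.length
instance (stage_real : List (List Int)) : Decidable (Pre_find_can_place stage_real) := by
  unfold Pre_find_can_place; infer_instance

def pvWitness_find_can_place : List (List Int) := [[100, 300], [500, 300], [500, 500]]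

def Spec_find_can_place (stage_real : List (List Int)) (out : List (List Int)) : Prop := out = find_can_place_alt stage_real
instance (stage_real : List (List Int)) (out : List (List Int)) : Decidable (Spec_find_can_place stage_real out) := by unfold Spec_find_can_place; infer_instance

-- ===== CLAIM (what is proved, stated in full; the proofs are below) =====
def Claim_equal_find_can_place : Prop := ∀ (stage_real : List (List Int)), Dom_find_can_place stage_real → Pre_find_can_place stage_real → Spec_find_can_place stage_real (find_can_place stage_real)

-- ===== LEMMAS AND PROOFS =====

-- a single axis step strictly shrinks the distance to the axis target
theorem pvWalkDec (t x : Int) (h : x ≠ t) :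
    (t - (if t > x then x + 1 else x - 1)).natAbs < (t - x).natAbs := by
  by_cases h2 : t > x
  · rw [if_pos h2, show t - (x + 1) = (t - x) - 1 by ring]
    exact pvAbsDecPos _ (by omega)
  · rw [if_neg h2, show t - (x - 1) = (t - x) + 1 by ring]
    exact pvAbsDecNeg _ (by omega)

-- intermediate model: A's loop simulated as a per-waypoint walk (x axis, then y axis),
-- appending each step and stopping on the goal cell
def pvWalkX (goal : Int × Int) (tx x y : Int) (ground : List (List Int)) :
    List (List Int) × Int × Bool :=
  if x = tx then (ground, x, false)
  else
    let x' := if tx > x then x + 1 else x - 1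
    let g' := ground ++ [[x', y]]
    if (x', y) = goal then (g', x', true)
    else pvWalkX goal tx x' y g'
termination_by (tx - x).natAbs
decreasing_by exact pvWalkDec tx x ‹x ≠ tx›

def pvWalkY (goal : Int × Int) (ty x y : Int) (ground : List (List Int)) :
    List (List Int) × Int × Bool :=
  if y = ty then (ground, y, false)
  else
    let y' := if ty > y then y + 1 else y - 1
    let g' := ground ++ [[x, y']]
    if (x, y') = goal then (g', y', true)
    else pvWalkY goal ty x y' g'
termination_by (ty - y).natAbs
decreasing_by exact pvWalkDec ty y ‹y ≠ ty›

def pvSegs (goal : Int × Int) (segs : List (Int × Int)) (x y : Int)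
    (ground : List (List Int)) : List (List Int) :=
  match segs with
  | [] => ground
  | (tx, ty) :: rest =>
    match pvWalkX goal tx x y ground with
    | (g1, _x1, true) => g1
    | (g1, x1, false) =>
      match pvWalkY goal ty x1 y g1 with
      | (g2, _y1, true) => g2
      | (g2, y1, false) => pvSegs goal rest x1 y1 g2

-- truncate a list at (and including) the first occurrence of gp
def pvTrunc (gp : List Int) : List (List Int) → List (List Int)
  | [] => []
  | a :: l => if a = gp then [a] else a :: pvTrunc gp l

-- full untruncated path generated from a cursor over the remaining waypoints
def pvPathOf (segs : List (Int × Int)) (x y : Int) : List (List Int) :=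
  match segs with
  | [] => []
  | (tx, ty) :: rest => pvBX x tx y ++ pvBY y ty tx ++ pvPathOf rest tx ty

theorem pvTrunc_append_left (gp : List Int) (l1 l2 : List (List Int)) (h : gp ∈ l1) :
    pvTrunc gp (l1 ++ l2) = pvTrunc gp l1 := by
  induction l1 with
  | nil => simp at h
  | cons a l ih =>
    by_cases ha : a = gp
    · simp [pvTrunc, ha]
    · have hm : gp ∈ l := by
        rcases List.mem_cons.mp h with h' | h'
        · exact absurd h'.symm ha
        · exact h'
      rw [List.cons_append, pvTrunc, pvTrunc, if_neg ha, if_neg ha, ih hm]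

theorem pvTrunc_append_right (gp : List Int) (l1 l2 : List (List Int)) (h : gp ∉ l1) :
    pvTrunc gp (l1 ++ l2) = l1 ++ pvTrunc gp l2 := by
  induction l1 with
  | nil => rfl
  | cons a l ih =>
    simp only [List.mem_cons, not_or] at h
    rw [List.cons_append, pvTrunc, if_neg (fun he => h.1 he.symm), ih h.2, List.cons_append]

-- unfolding of the x block one cell at a time
theorem pvBX_cons (x tx y : Int) (h : x ≠ tx) :
    pvBX x tx y = [(if tx > x then x + 1 else x - 1), y] ::
      pvBX (if tx > x then x + 1 else x - 1) tx y := by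
  by_cases hgt : tx > x
  · rw [if_pos hgt]
    unfold pvBX
    rw [if_pos (by omega : tx ≥ x), if_pos (by omega : tx ≥ x + 1),
      PySem.List.pyRange_one_cons (by omega)]
    simp
  · rw [if_neg hgt]
    have hlt : tx < x := by omega
    unfold pvBX
    rw [if_neg (by omega : ¬ tx ≥ x),
      show x + (-1 : Int) = x - 1 from by ring, show tx + (-1 : Int) = tx - 1 from by ring,
      PySem.List.pyRange_neg_one_cons (by omega)]
    by_cases he : tx = x - 1
    · rw [if_pos (by omega : tx ≥ x - 1),
        PySem.List.pyRange_one_eq_nil (by omega : tx + 1 ≤ x - 1 + 1),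
        PySem.List.pyRange_neg_one_eq_nil (by omega : x - 1 - 1 ≤ tx - 1)]
      simp
    · rw [if_neg (by omega : ¬ tx ≥ x - 1),
        show x - 1 + (-1 : Int) = x - 1 - 1 from by ring,
        show tx + (-1 : Int) = tx - 1 from by ring]
      simp

theorem pvBY_cons (y ty x : Int) (h : y ≠ ty) :
    pvBY y ty x = [x, (if ty > y then y + 1 else y - 1)] ::
      pvBY (if ty > y then y + 1 else y - 1) ty x := by
  by_cases hgt : ty > y
  · rw [if_pos hgt]
    unfold pvBY
    rw [if_pos (by omega : ty ≥ y), if_pos (by omega : ty ≥ y + 1),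
      PySem.List.pyRange_one_cons (by omega)]
    simp
  · rw [if_neg hgt]
    have hlt : ty < y := by omega
    unfold pvBY
    rw [if_neg (by omega : ¬ ty ≥ y),
      show y + (-1 : Int) = y - 1 from by ring, show ty + (-1 : Int) = ty - 1 from by ring,
      PySem.List.pyRange_neg_one_cons (by omega)]
    by_cases he : ty = y - 1
    · rw [if_pos (by omega : ty ≥ y - 1),
        PySem.List.pyRange_one_eq_nil (by omega : ty + 1 ≤ y - 1 + 1),
        PySem.List.pyRange_neg_one_eq_nil (by omega : y - 1 - 1 ≤ ty - 1)]
      simp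
    · rw [if_neg (by omega : ¬ ty ≥ y - 1),
        show y - 1 + (-1 : Int) = y - 1 - 1 from by ring,
        show ty + (-1 : Int) = ty - 1 from by ring]
      simp

theorem pvBX_refl (x y : Int) : pvBX x x y = [] := by
  unfold pvBX
  rw [if_pos (le_refl x), PySem.List.pyRange_one_eq_nil (by omega)]
  rfl

theorem pvBY_refl (y x : Int) : pvBY y y x = [] := by
  unfold pvBY
  rw [if_pos (le_refl y), PySem.List.pyRange_one_eq_nil (by omega)]
  rfl

-- walk characterisations: the walk produces exactly the (truncated) block
theorem pvWalkX_trunc (goal : Int × Int) (tx x y : Int) (g : List (List Int)) :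
    (if [goal.1, goal.2] ∈ pvBX x tx y then
      ∃ x', pvWalkX goal tx x y g = (g ++ pvTrunc [goal.1, goal.2] (pvBX x tx y), x', true)
    else pvWalkX goal tx x y g = (g ++ pvBX x tx y, tx, false)) := by
  fun_induction pvWalkX goal tx x y g with
  | case1 g =>
    rw [if_neg (by rw [pvBX_refl]; simp), pvBX_refl, List.append_nil]
  | case2 x g hne x' g' hgoal =>
    have hx'd : x' = if tx > x then x + 1 else x - 1 := by simp only [x', dite_eq_ite]
    have hbx : pvBX x tx y = [x', y] :: pvBX x' tx y := by
      rw [pvBX_cons x tx y hne, ← hx'd]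
    have hx' : ([x', y] : List Int) = [goal.1, goal.2] := by rw [← hgoal]
    rw [if_pos (by rw [hbx, ← hx']; exact List.mem_cons_self)]
    refine ⟨x', ?_⟩
    rw [hbx, pvTrunc, if_pos hx']
  | case3 x g hne x' g' hgoal ih =>
    have hx'd : x' = if tx > x then x + 1 else x - 1 := by simp only [x', dite_eq_ite]
    have hbx : pvBX x tx y = [x', y] :: pvBX x' tx y := by
      rw [pvBX_cons x tx y hne, ← hx'd]
    have hx' : ([x', y] : List Int) ≠ [goal.1, goal.2] := by
      intro he
      simp only [List.cons.injEq] at he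
      exact hgoal (Prod.ext he.1 he.2.1)
    rw [hbx]
    by_cases hm : [goal.1, goal.2] ∈ pvBX x' tx y
    · rw [if_pos (List.mem_cons_of_mem _ hm)]
      rw [if_pos hm] at ih
      obtain ⟨x'', hw⟩ := ih
      refine ⟨x'', ?_⟩
      rw [hw, pvTrunc, if_neg hx']
      simp [g']
    · rw [if_neg (by
        intro hc
        rcases List.mem_cons.mp hc with hc | hc
        · exact hx' hc.symm
        · exact hm hc)]
      rw [if_neg hm] at ih
      rw [ih]
      simp [g']

theorem pvWalkY_trunc (goal : Int × Int) (ty x y : Int) (g : List (List Int)) :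
    (if [goal.1, goal.2] ∈ pvBY y ty x then
      ∃ y', pvWalkY goal ty x y g = (g ++ pvTrunc [goal.1, goal.2] (pvBY y ty x), y', true)
    else pvWalkY goal ty x y g = (g ++ pvBY y ty x, ty, false)) := by
  fun_induction pvWalkY goal ty x y g with
  | case1 g =>
    rw [if_neg (by rw [pvBY_refl]; simp), pvBY_refl, List.append_nil]
  | case2 y g hne y' g' hgoal =>
    have hy'd : y' = if ty > y then y + 1 else y - 1 := by simp only [y', dite_eq_ite]
    have hby : pvBY y ty x = [x, y'] :: pvBY y' ty x := by
      rw [pvBY_cons y ty x hne, ← hy'd]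
    have hy' : ([x, y'] : List Int) = [goal.1, goal.2] := by rw [← hgoal]
    rw [if_pos (by rw [hby, ← hy']; exact List.mem_cons_self)]
    refine ⟨y', ?_⟩
    rw [hby, pvTrunc, if_pos hy']
  | case3 y g hne y' g' hgoal ih =>
    have hy'd : y' = if ty > y then y + 1 else y - 1 := by simp only [y', dite_eq_ite]
    have hby : pvBY y ty x = [x, y'] :: pvBY y' ty x := by
      rw [pvBY_cons y ty x hne, ← hy'd]
    have hy' : ([x, y'] : List Int) ≠ [goal.1, goal.2] := by
      intro he
      simp only [List.cons.injEq] at he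
      exact hgoal (Prod.ext he.1 he.2.1)
    rw [hby]
    by_cases hm : [goal.1, goal.2] ∈ pvBY y' ty x
    · rw [if_pos (List.mem_cons_of_mem _ hm)]
      rw [if_pos hm] at ih
      obtain ⟨y'', hw⟩ := ih
      refine ⟨y'', ?_⟩
      rw [hw, pvTrunc, if_neg hy']
      simp [g']
    · rw [if_neg (by
        intro hc
        rcases List.mem_cons.mp hc with hc | hc
        · exact hy' hc.symm
        · exact hm hc)]
      rw [if_neg hm] at ih
      rw [ih]
      simp [g']

-- the segment walk equals the truncated full path
theorem pvSegs_eq_trunc (goal : Int × Int) (segs : List (Int × Int)) (x y : Int)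
    (g : List (List Int)) :
    pvSegs goal segs x y g = g ++ pvTrunc [goal.1, goal.2] (pvPathOf segs x y) := by
  induction segs generalizing x y g with
  | nil => rw [pvSegs, pvPathOf, pvTrunc, List.append_nil]
  | cons s rest ih =>
    rcases s with ⟨tx, ty⟩
    rw [pvSegs, pvPathOf]
    have hwx := pvWalkX_trunc goal tx x y g
    by_cases hmx : [goal.1, goal.2] ∈ pvBX x tx y
    · rw [if_pos hmx] at hwx
      obtain ⟨x', hw⟩ := hwx
      simp only [hw]
      rw [List.append_assoc, pvTrunc_append_left _ _ _ hmx]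
    · rw [if_neg hmx] at hwx
      simp only [hwx]
      have hwy := pvWalkY_trunc goal ty tx y (g ++ pvBX x tx y)
      by_cases hmy : [goal.1, goal.2] ∈ pvBY y ty tx
      · rw [if_pos hmy] at hwy
        obtain ⟨y', hw2⟩ := hwy
        simp only [hw2]
        rw [pvTrunc_append_left _ _ _ (List.mem_append_right _ hmy),
          pvTrunc_append_right _ _ _ hmx]
        simp [List.append_assoc]
      · rw [if_neg hmy] at hwy
        simp only [hwy, ih]
        have hno : [goal.1, goal.2] ∉ pvBX x tx y ++ pvBY y ty tx := by
          rw [List.mem_append]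
          exact fun hc => hc.elim hmx hmy
        rw [pvTrunc_append_right _ _ _ hno]
        simp [List.append_assoc]

-- the goal cell of a segment lies on the cursor cell or that segment's blocks
theorem pvMemSeg (x y tx ty : Int) (rest : List (List Int)) :
    [tx, ty] ∈ [x, y] :: (pvBX x tx y ++ pvBY y ty tx ++ rest) := by
  by_cases hy : y = ty
  · by_cases hx : x = tx
    · subst hx; subst hy; exact List.mem_cons_self
    · refine List.mem_cons_of_mem _ (List.mem_append_left _ (List.mem_append_left _ ?_))
      unfold pvBX
      by_cases hgt : tx ≥ x
      · rw [if_pos hgt]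
        subst hy
        exact List.mem_map_of_mem (PySem.List.mem_pyRange_one.mpr ⟨by omega, by omega⟩)
      · rw [if_neg hgt]
        subst hy
        exact List.mem_map_of_mem (PySem.List.mem_pyRange_neg_one.mpr ⟨by omega, by omega⟩)
  · refine List.mem_cons_of_mem _
      (List.mem_append_left _ (List.mem_append_right _ ?_))
    unfold pvBY
    by_cases hgt : ty ≥ y
    · rw [if_pos hgt]
      exact List.mem_map_of_mem (PySem.List.mem_pyRange_one.mpr ⟨by omega, by omega⟩)
    · rw [if_neg hgt]
      exact List.mem_map_of_mem (PySem.List.mem_pyRange_neg_one.mpr ⟨by omega, by omega⟩)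

-- the last waypoint always lies on the generated path (hence list.index never raises)
theorem pvMemPath (segs : List (Int × Int)) (x y : Int) (t : Int × Int)
    (ht : segs.getLast? = some t) :
    [t.1, t.2] ∈ [x, y] :: pvPathOf segs x y := by
  induction segs generalizing x y with
  | nil => simp at ht
  | cons s rest ih =>
    rcases s with ⟨tx, ty⟩
    cases rest with
    | nil =>
      have hts : t = (tx, ty) := by
        simp only [List.getLast?_singleton, Option.some.injEq] at ht
        exact ht.symm
      subst hts
      simpa [pvPathOf] using pvMemSeg x y tx ty []
    | cons s2 r2 =>
      have hm := ih tx ty (by rw [← ht, List.getLast?_cons_cons])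
      rcases List.mem_cons.mp hm with hm | hm
      · rw [hm, pvPathOf]
        exact pvMemSeg x y tx ty _
      · refine List.mem_cons_of_mem _ ?_
        have hunf : pvPathOf ((tx, ty) :: s2 :: r2) x y
            = pvBX x tx y ++ pvBY y ty tx ++ pvPathOf (s2 :: r2) tx ty := by
          conv_lhs => rw [pvPathOf]
        rw [hunf]
        exact List.mem_append_right _ hm

-- B's foldl over zipped waypoint pairs builds exactly the cursor path
theorem pvFoldl_path (rest : List (Int × Int)) (c : Int × Int) (init : List (List Int)) :
    ((c :: rest).zip rest).foldl
      (fun path p => path ++ pvBX p.1.1 p.2.1 p.1.2 ++ pvBY p.1.2 p.2.2 p.2.1) init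
      = init ++ pvPathOf rest c.1 c.2 := by
  induction rest generalizing c init with
  | nil => simp [pvPathOf]
  | cons s r ih =>
    rw [show (c :: s :: r).zip (s :: r) = (c, s) :: (s :: r).zip r from rfl,
      List.foldl_cons, ih s, pvPathOf]
    simp [List.append_assoc]

-- B's index?/take truncation is pvTrunc when the goal occurs on the path
theorem pvTake_index (gp : List Int) (path : List (List Int)) (h : gp ∈ path) :
    (match PySem.List.index? path gp with
      | some i => path.take (i + 1)
      | none => ([] : List (List Int))) = pvTrunc gp path := by
  induction path with
  | nil => simp at h
  | cons a l ih =>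
    by_cases ha : a = gp
    · subst ha
      rw [PySem.List.index?_cons_self]
      simp [pvTrunc]
    · rw [PySem.List.index?_cons_of_ne l ha]
      have hm : gp ∈ l := by
        rcases List.mem_cons.mp h with h | h
        · exact absurd h.symm ha
        · exact h
      obtain ⟨i, hi⟩ := Option.isSome_iff_exists.mp ((PySem.List.index?_isSome_iff l gp).mpr hm)
      rw [hi]
      simp only [Option.map_some]
      rw [pvTrunc, if_neg ha, ← ih hm, hi]
      rfl

-- main simulation for A (from the earlier step-by-step model)
theorem pvWalkX_step (goal : Int × Int) (tx x y : Int) (g : List (List Int))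
    (hx : x ≠ tx)
    (hg : ¬ ((if tx > x then x + 1 else x - 1), y) = goal) :
    pvWalkX goal tx x y g =
      pvWalkX goal tx (if tx > x then x + 1 else x - 1) y
        (g ++ [[(if tx > x then x + 1 else x - 1), y]]) := by
  rw [pvWalkX]; simp [hx, hg]

theorem pvWalkX_done (goal : Int × Int) (tx x y : Int) (g : List (List Int))
    (hx : x ≠ tx)
    (hg : ((if tx > x then x + 1 else x - 1), y) = goal) :
    pvWalkX goal tx x y g =
      (g ++ [[(if tx > x then x + 1 else x - 1), y]], (if tx > x then x + 1 else x - 1), true) := by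
  rw [pvWalkX]; simp [hx, hg]

theorem pvWalkX_refl (goal : Int × Int) (x y : Int) (g : List (List Int)) :
    pvWalkX goal x x y g = (g, x, false) := by
  rw [pvWalkX]; simp

theorem pvWalkY_step (goal : Int × Int) (ty x y : Int) (g : List (List Int))
    (hy : y ≠ ty)
    (hg : ¬ (x, (if ty > y then y + 1 else y - 1)) = goal) :
    pvWalkY goal ty x y g =
      pvWalkY goal ty x (if ty > y then y + 1 else y - 1)
        (g ++ [[x, (if ty > y then y + 1 else y - 1)]]) := by
  rw [pvWalkY]; simp [hy, hg]

theorem pvWalkY_done (goal : Int × Int) (ty x y : Int) (g : List (List Int))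
    (hy : y ≠ ty)
    (hg : (x, (if ty > y then y + 1 else y - 1)) = goal) :
    pvWalkY goal ty x y g =
      (g ++ [[x, (if ty > y then y + 1 else y - 1)]], (if ty > y then y + 1 else y - 1), true) := by
  rw [pvWalkY]; simp [hy, hg]

theorem pvWalkY_refl (goal : Int × Int) (x y : Int) (g : List (List Int)) :
    pvWalkY goal y x y g = (g, y, false) := by
  rw [pvWalkY]; simp

theorem pvSegs_cons_skip (goal : Int × Int) (rest : List (Int × Int)) (x y : Int)
    (g : List (List Int)) :
    pvSegs goal ((x, y) :: rest) x y g = pvSegs goal rest x y g := by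
  simp only [pvSegs, pvWalkX_refl, pvWalkY_refl]

theorem pvSegs_cons_stepX (goal : Int × Int) (tx ty : Int) (rest : List (Int × Int))
    (x y x' : Int) (g : List (List Int))
    (hx : x ≠ tx) (hx' : x' = if tx > x then x + 1 else x - 1) (hg : (x', y) ≠ goal) :
    pvSegs goal ((tx, ty) :: rest) x y g =
      pvSegs goal ((tx, ty) :: rest) x' y (g ++ [[x', y]]) := by
  subst hx'
  conv_lhs => rw [pvSegs]
  rw [pvWalkX_step goal tx x y g hx hg]
  conv_rhs => rw [pvSegs]

theorem pvSegs_cons_doneX (goal : Int × Int) (tx ty : Int) (rest : List (Int × Int))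
    (x y x' : Int) (g : List (List Int))
    (hx : x ≠ tx) (hx' : x' = if tx > x then x + 1 else x - 1) (hg : (x', y) = goal) :
    pvSegs goal ((tx, ty) :: rest) x y g = g ++ [[x', y]] := by
  subst hx'
  rw [pvSegs, pvWalkX_done goal tx x y g hx hg]

theorem pvSegs_cons_stepY (goal : Int × Int) (ty : Int) (rest : List (Int × Int))
    (x y y' : Int) (g : List (List Int))
    (hy : y ≠ ty) (hy' : y' = if ty > y then y + 1 else y - 1) (hg : (x, y') ≠ goal) :
    pvSegs goal ((x, ty) :: rest) x y g =
      pvSegs goal ((x, ty) :: rest) x y' (g ++ [[x, y']]) := by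
  subst hy'
  conv_lhs => rw [pvSegs]
  rw [pvWalkX_refl]
  conv_rhs => rw [pvSegs, pvWalkX_refl]
  simp only
  rw [pvWalkY_step goal ty x y g hy hg]

theorem pvSegs_cons_doneY (goal : Int × Int) (ty : Int) (rest : List (Int × Int))
    (x y y' : Int) (g : List (List Int))
    (hy : y ≠ ty) (hy' : y' = if ty > y then y + 1 else y - 1) (hg : (x, y') = goal) :
    pvSegs goal ((x, ty) :: rest) x y g = g ++ [[x, y']] := by
  subst hy'
  rw [pvSegs, pvWalkX_refl]
  simp only
  rw [pvWalkY_done goal ty x y g hy hg]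

-- A's loop from state (part, temp) equals the step-by-step walk over stage.drop part
theorem pvALoop_eq_pvSegs (stage : List (Int × Int)) (last : Int × Int) (part : Nat)
    (temp : Int × Int) (ground : List (List Int))
    (h1 : part ≤ stage.length) (h2 : temp ≠ last) :
    pvALoop stage last part temp ground = pvSegs last (stage.drop part) temp.1 temp.2 ground := by
  fun_induction pvALoop stage last part temp ground with
  | case1 part ground => exact absurd rfl h2
  | case2 part temp ground hne hlt htv ih =>
    rcases hsp : stage[part] with ⟨tx, ty⟩
    rw [hsp] at htv
    obtain ⟨hdx, hdy⟩ := htv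
    simp only at hdx hdy
    rw [ih (by omega) h2, List.drop_eq_getElem_cons hlt, hsp,
      show tx = temp.1 by omega, show ty = temp.2 by omega, pvSegs_cons_skip]
  | case3 part temp ground hne hlt htv temp' ih =>
    rcases hsp : stage[part] with ⟨tx, ty⟩
    rw [hsp] at htv
    simp only at htv
    have ht' : temp' = if tx - temp.1 > 0 then (temp.1 + 1, temp.2)
        else if tx - temp.1 < 0 then (temp.1 - 1, temp.2)
        else if ty - temp.2 > 0 then (temp.1, temp.2 + 1)
        else (temp.1, temp.2 - 1) := by
      simp only [temp', hsp, dite_eq_ite]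
    conv_rhs => rw [List.drop_eq_getElem_cons hlt, hsp]
    by_cases hx1 : tx - temp.1 > 0
    · rw [if_pos hx1] at ht'
      by_cases hlast : temp' = last
      · rw [pvALoop, if_pos hlast, ht',
          pvSegs_cons_doneX last tx ty _ temp.1 temp.2 (temp.1 + 1) ground (by omega)
            (by rw [if_pos (by omega)]) (by rw [← ht']; exact hlast)]
      · rw [ih h1 hlast,
          pvSegs_cons_stepX last tx ty _ temp.1 temp.2 (temp.1 + 1) ground (by omega)
            (by rw [if_pos (by omega)]) (by rw [← ht']; exact hlast),
          ← hsp, ← List.drop_eq_getElem_cons hlt, ht']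
    · by_cases hx2 : tx - temp.1 < 0
      · rw [if_neg hx1, if_pos hx2] at ht'
        by_cases hlast : temp' = last
        · rw [pvALoop, if_pos hlast, ht',
            pvSegs_cons_doneX last tx ty _ temp.1 temp.2 (temp.1 - 1) ground (by omega)
              (by rw [if_neg (by omega)]) (by rw [← ht']; exact hlast)]
        · rw [ih h1 hlast,
            pvSegs_cons_stepX last tx ty _ temp.1 temp.2 (temp.1 - 1) ground (by omega)
              (by rw [if_neg (by omega)]) (by rw [← ht']; exact hlast),
            ← hsp, ← List.drop_eq_getElem_cons hlt, ht']
      · have hxeq : tx = temp.1 := by omega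
        subst hxeq
        by_cases hy1 : ty - temp.2 > 0
        · rw [if_neg hx1, if_neg hx2, if_pos hy1] at ht'
          by_cases hlast : temp' = last
          · rw [pvALoop, if_pos hlast, ht',
              pvSegs_cons_doneY last ty _ temp.1 temp.2 (temp.2 + 1) ground (by omega)
                (by rw [if_pos (by omega)]) (by rw [← ht']; exact hlast)]
          · rw [ih h1 hlast,
              pvSegs_cons_stepY last ty _ temp.1 temp.2 (temp.2 + 1) ground (by omega)
                (by rw [if_pos (by omega)]) (by rw [← ht']; exact hlast),
              ← hsp, ← List.drop_eq_getElem_cons hlt, ht']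
        · have hy2 : ty - temp.2 < 0 := by
            rcases lt_trichotomy (ty - temp.2) 0 with h | h | h
            · exact h
            · exact absurd ⟨by omega, h⟩ htv
            · exact absurd h hy1
          rw [if_neg hx1, if_neg hx2, if_neg hy1] at ht'
          by_cases hlast : temp' = last
          · rw [pvALoop, if_pos hlast, ht',
              pvSegs_cons_doneY last ty _ temp.1 temp.2 (temp.2 - 1) ground (by omega)
                (by rw [if_neg (by omega)]) (by rw [← ht']; exact hlast)]
          · rw [ih h1 hlast,
              pvSegs_cons_stepY last ty _ temp.1 temp.2 (temp.2 - 1) ground (by omega)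
                (by rw [if_neg (by omega)]) (by rw [← ht']; exact hlast),
              ← hsp, ← List.drop_eq_getElem_cons hlt, ht']
  | case4 part temp ground hne hge =>
    have : part = stage.length := by omega
    subst this
    rw [List.drop_length, pvSegs]

-- ===== VERDICT (by name: the statement is the Claim_ definition above) =====
theorem find_can_place_spec : Claim_equal_find_can_place := by
  intro stage_real hdom hpre
  unfold Spec_find_can_place find_can_place find_can_place_alt
  cases hs : pvScale stage_real with
  | nil =>
    exact absurd (List.map_eq_nil_iff.mp hs) hpre.1
  | cons s0 rest =>
    simp only
    by_cases hlast : (s0.1 + 1, s0.2) = ((s0.1 + 1, s0.2) :: rest).getLast (by simp)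
    · rw [pvALoop, if_pos hlast]
      rw [pvFoldl_path rest (s0.1 + 1, s0.2)]
      cases rest with
      | nil =>
        rw [pvPathOf, List.append_nil]
        have : ((s0.1 + 1, s0.2) :: ([] : List (Int × Int))).getLast (by simp)
            = (s0.1 + 1, s0.2) := rfl
        rw [this, PySem.List.index?_cons_self]
        rfl
      | cons s2 r2 =>
        rw [← hlast]
        simp only [List.singleton_append]
        rw [PySem.List.index?_cons_self]
        rfl
    · rw [pvALoop_eq_pvSegs ((s0.1 + 1, s0.2) :: rest) _ 1 (s0.1 + 1, s0.2) _ (by simp) hlast]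
      rw [show ((s0.1 + 1, s0.2) :: rest).drop 1 = rest from rfl]
      rw [pvSegs_eq_trunc, pvFoldl_path rest (s0.1 + 1, s0.2)]
      have hrest : rest ≠ [] := by
        intro he
        subst he
        exact hlast rfl
      have hmem2 : [(((s0.1 + 1, s0.2) :: rest).getLast (by simp)).1,
          (((s0.1 + 1, s0.2) :: rest).getLast (by simp)).2]
          ∈ [s0.1 + 1, s0.2] :: pvPathOf rest (s0.1 + 1) s0.2 := by
        apply pvMemPath
        obtain ⟨s2', r2', hre⟩ := List.exists_cons_of_ne_nil hrest
        subst hre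
        rw [← List.getLast?_cons_cons (a := (s0.1 + 1, s0.2))]
        exact List.getLast?_eq_some_getLast _
      rw [show ([[s0.1 + 1, s0.2]] ++ pvPathOf rest (s0.1 + 1) s0.2)
          = [s0.1 + 1, s0.2] :: pvPathOf rest (s0.1 + 1) s0.2 from rfl]
      rw [pvTake_index _ _ hmem2]
      have hne : ([s0.1 + 1, s0.2] : List Int)
          ≠ [(((s0.1 + 1, s0.2) :: rest).getLast (by simp)).1,
             (((s0.1 + 1, s0.2) :: rest).getLast (by simp)).2] := by
        intro he
        simp only [List.cons.injEq] at he
        exact hlast (Prod.ext he.1 he.2.1)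
      rw [pvTrunc, if_neg hne]
      rfl
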